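-- pv_equiv track=rewrite | github.com/gloridas75/ngrsserver08 | context/constraints/C2_mom_weekly_hours.py | analyze_pattern_consecutive_positions
-- ===== SOURCE A (Python) =====
-- def analyze_pattern_consecutive_positions(pattern: list) -> dict:
--     """Analyze work pattern to identify consecutive work day positions.
--
--     Returns dict mapping pattern_index -> consecutive_position.
--
--     Example:
--         Pattern ['D','D','D','D','D','O','D']:
--         {0: 1, 1: 2, 2: 3, 3: 4, 4: 5, 5: 0, 6: 1}
--         (Positions 0-4 are consecutive days 1-5, position 6 resets to 1 after 'O')
--
--     Example with 6 consecutive: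
--         Pattern ['D','D','D','D','D','D','O']:
--         {0: 1, 1: 2, 2: 3, 3: 4, 4: 5, 5: 6, 6: 0}
--         (Position 5 is 6th consecutive day)
--     """
--     position_map = {}
--     consecutive_count = 0
--
--     for idx, day in enumerate(pattern):
--         if day != 'O':  # Work day
--             consecutive_count += 1
--             position_map[idx] = consecutive_count
--         else:  # Off day
--             position_map[idx] = 0  # Mark as off
--             consecutive_count = 0  # Reset counter
--
--     return position_map
-- ===== SOURCE B (Python) =====
-- def analyze_pattern_consecutive_positions(pattern: list) -> dict:
--     """Run-based re-implementation: split the pattern into maximal runs of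
--     work days / off days; number each work run 1..len locally, map off runs to 0."""
--     position_map = {}
--     n = len(pattern)
--     i = 0
--     while i < n:
--         work = pattern[i] != 'O'
--         j = i
--         while j < n and (pattern[j] != 'O') == work:
--             j += 1
--         if work:
--             for pos, idx in enumerate(range(i, j), start=1):
--                 position_map[idx] = pos
--         else:
--             for idx in range(i, j):
--                 position_map[idx] = 0
--         i = j
--     return position_map
-- ===== Notes on version B (the rewrite author's own statement) =====
-- stated objective: alternative
-- what changed: Replaced A's single pass with a running consecutive counter by a run-splitting scan: find each maximal run of work/off days and assign per-run local numbers 1..len (or zeros), merging runs by index.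
import Mathlib
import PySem

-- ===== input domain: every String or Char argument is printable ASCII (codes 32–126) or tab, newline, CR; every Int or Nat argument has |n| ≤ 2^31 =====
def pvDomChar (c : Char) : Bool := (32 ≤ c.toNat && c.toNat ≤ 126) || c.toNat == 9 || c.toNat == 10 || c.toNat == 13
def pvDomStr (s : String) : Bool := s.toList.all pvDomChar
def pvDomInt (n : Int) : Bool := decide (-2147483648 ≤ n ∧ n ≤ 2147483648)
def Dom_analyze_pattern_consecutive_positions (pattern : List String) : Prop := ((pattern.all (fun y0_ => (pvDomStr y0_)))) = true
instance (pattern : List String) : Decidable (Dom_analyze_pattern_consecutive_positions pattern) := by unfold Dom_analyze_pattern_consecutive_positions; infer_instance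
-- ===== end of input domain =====

-- B replaces A's running consecutive counter by a run-splitting scan with per-run local numbering; alternative decomposition, same cost.

-- ===== PORT A =====
-- one pass over enumerate(pattern) carrying (position_map, consecutive_count)
def analyze_pattern_consecutive_positions (pattern : List String) : List (Int × Int) :=
  let st :=
    (PySem.List.enumerate pattern 0).foldl
      (fun (st : PySem.Dict Int Int × Int) (p : Int × String) =>
        if p.2 ≠ "O" then (st.1.insert p.1 (st.2 + 1), st.2 + 1)
        else (st.1.insert p.1 0, 0))
      (PySem.Dict.empty, 0)
  st.1.items

-- ===== PORT B =====
-- the maximal run starting at the head (Source B's inner `while j < n and (pattern[j] != 'O') == work`)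
-- is List.takeWhile / List.dropWhile with that predicate; each run contributes its entries at once:
-- a work run is numbered 1..len locally, an off run is all zeros.
def pvRunGo (i : Int) (xs : List String) : List (Int × Int) :=
  match xs with
  | x :: rest =>
    let work : Bool := x != "O"
    let pred : String → Bool := fun y => (y != "O") == work
    let run := (x :: rest).takeWhile pred
    let assigned : List (Int × Int) :=
      if work then (List.range run.length).map (fun (p : Nat) => (i + (p : Int), ((p : Int) + 1)))
      else (List.range run.length).map (fun (p : Nat) => (i + (p : Int), 0))
    assigned ++ pvRunGo (i + run.length) ((x :: rest).dropWhile pred)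
  | [] => []
termination_by xs.length
decreasing_by
  simp only [List.dropWhile_cons]
  have hpx : ((x != "O") == (x != "O")) = true := by simp
  simp only [hpx, if_true]
  exact Nat.lt_succ_of_le (List.length_dropWhile_le _ _)

def analyze_pattern_consecutive_positions_alt (pattern : List String) : List (Int × Int) :=
  pvRunGo 0 pattern

-- ===== PRECONDITION & SPEC =====
def Spec_analyze_pattern_consecutive_positions (pattern : List String) (out : List (Int × Int)) : Prop := out = analyze_pattern_consecutive_positions_alt pattern
instance (pattern : List String) (out : List (Int × Int)) : Decidable (Spec_analyze_pattern_consecutive_positions pattern out) := by unfold Spec_analyze_pattern_consecutive_positions; infer_instance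

-- ===== CLAIM (what is proved, stated in full; the proofs are below) =====
def Claim_equal_analyze_pattern_consecutive_positions : Prop := ∀ (pattern : List String), Dom_analyze_pattern_consecutive_positions pattern → Spec_analyze_pattern_consecutive_positions pattern (analyze_pattern_consecutive_positions pattern)

-- ===== LEMMAS AND PROOFS =====

-- reference recursion: the item list A's loop produces from start index i and counter c
def pvF (i c : Int) : List String → List (Int × Int)
  | [] => []
  | x :: xs => if x ≠ "O" then (i, c + 1) :: pvF (i + 1) (c + 1) xs
               else (i, 0) :: pvF (i + 1) 0 xs

-- A's fold, started on a dict whose keys are all < i, appends pvF i c xs to the items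
theorem pvA_fold (xs : List String) : ∀ (i : Int) (d : PySem.Dict Int Int) (c : Int),
    (∀ k ∈ d.keys, k < i) →
    ((PySem.List.enumerate xs i).foldl
      (fun (st : PySem.Dict Int Int × Int) (p : Int × String) =>
        if p.2 ≠ "O" then (st.1.insert p.1 (st.2 + 1), st.2 + 1)
        else (st.1.insert p.1 0, 0))
      (d, c)).1.items = d.items ++ pvF i c xs := by
  induction xs with
  | nil => intro i d c _; simp [PySem.List.enumerate_nil, pvF]
  | cons x xs ih =>
    intro i d c hlt
    have hnc : d.contains i = false := by
      cases hb : d.contains i with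
      | false => rfl
      | true =>
        exact absurd (hlt i ((PySem.Dict.contains_iff_mem_keys d i).mp hb)) (lt_irrefl i)
    have hkeys : ∀ (v : Int), ∀ k ∈ (d.insert i v).keys, k < i + 1 := by
      intro v k hk
      rcases (PySem.Dict.mem_keys_insert d i k v).mp hk with h | h
      · omega
      · exact lt_trans (hlt k h) (by omega)
    rw [PySem.List.enumerate_cons]
    by_cases hx : x = "O"
    · simp only [List.foldl_cons, hx, ne_eq, not_true_eq_false, if_false]
      rw [ih (i + 1) (d.insert i 0) 0 (hkeys 0)]
      rw [PySem.Dict.items_insert_of_not_contains d _ hnc]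
      simp [pvF]
    · simp only [List.foldl_cons, ne_eq, hx, not_false_eq_true, if_true]
      rw [ih (i + 1) (d.insert i (c + 1)) (c + 1) (hkeys (c + 1))]
      rw [PySem.Dict.items_insert_of_not_contains d _ hnc]
      simp [pvF, hx]

-- an 'O' at the head resets the counter: the incoming counter is irrelevant
theorem pvF_head_off (i c : Int) (t : List String) :
    pvF i c ("O" :: t) = pvF i 0 ("O" :: t) := by
  simp [pvF]

-- pvF on a run of work days
theorem pvF_work_run (run : List String) : ∀ (rest : List String) (i c : Int),
    (∀ y ∈ run, y ≠ "O") →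
    pvF i c (run ++ rest)
      = (List.range run.length).map (fun (p : Nat) => (i + (p : Int), c + (p : Int) + 1))
        ++ pvF (i + run.length) (c + run.length) rest := by
  induction run with
  | nil => intro rest i c _; simp
  | cons x run ih =>
    intro rest i c hw
    have hx : x ≠ "O" := hw x List.mem_cons_self
    simp only [List.cons_append, pvF, hx, ne_eq, not_false_eq_true, if_true]
    rw [ih rest (i + 1) (c + 1) (fun y hy => hw y (List.mem_cons_of_mem _ hy))]
    rw [List.length_cons, List.range_succ_eq_map, List.map_cons, List.map_map, List.cons_append]
    congr 1
    · simp
    congr 1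
    · apply List.map_congr_left
      intro a _
      simp only [Function.comp_apply, Prod.mk.injEq]
      constructor <;> (push_cast; ring)
    · congr 1 <;> (push_cast; ring)

-- pvF (with counter 0) on a run of off days
theorem pvF_off_run (run : List String) : ∀ (rest : List String) (i : Int),
    (∀ y ∈ run, y = "O") →
    pvF i 0 (run ++ rest)
      = (List.range run.length).map (fun (p : Nat) => (i + (p : Int), 0))
        ++ pvF (i + run.length) 0 rest := by
  induction run with
  | nil => intro rest i _; simp
  | cons x run ih =>
    intro rest i hw
    have hx : x = "O" := hw x List.mem_cons_self
    simp only [List.cons_append, pvF, hx, ne_eq, not_true_eq_false, if_false]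
    rw [ih rest (i + 1) (fun y hy => hw y (List.mem_cons_of_mem _ hy))]
    rw [List.length_cons, List.range_succ_eq_map, List.map_cons, List.map_map, List.cons_append]
    congr 1
    · simp
    congr 1
    · apply List.map_congr_left
      intro a _
      simp only [Function.comp_apply, Prod.mk.injEq]
      constructor
      · push_cast; ring
      · trivial
    · congr 1
      push_cast; ring

-- after a run, the continuation's counter may be normalised to 0 (rest is empty or starts with 'O' / a work day as needed)
theorem pvF_reset (rest : List String) (i c : Int)
    (h : rest = [] ∨ ∃ t, rest = "O" :: t) :
    pvF i c rest = pvF i 0 rest := by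
  rcases h with h | ⟨t, h⟩ <;> subst h
  · rfl
  · exact pvF_head_off i c t

-- main bridge: pvRunGo i xs = pvF i 0 xs
theorem pvRunGo_eq_pvF (n : Nat) : ∀ (xs : List String), xs.length ≤ n → ∀ (i : Int),
    pvRunGo i xs = pvF i 0 xs := by
  induction n with
  | zero =>
    intro xs hlen i
    have : xs = [] := List.length_eq_zero_iff.mp (Nat.le_zero.mp hlen)
    subst this
    rw [pvRunGo]
    simp [pvF]
  | succ n ih =>
    intro xs hlen i
    match xs with
    | [] => rw [pvRunGo]; simp [pvF]
    | x :: rest0 =>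
      rw [pvRunGo]
      by_cases hx : x = "O"
      -- off run
      · have hwork : (x != "O") = false := by simp [hx]
        simp only [hwork]
        set pred : String → Bool := fun y => (y != "O") == false with hpred
        have hsplit : (x :: rest0).takeWhile pred ++ (x :: rest0).dropWhile pred = x :: rest0 :=
          List.takeWhile_append_dropWhile
        have hallO : ∀ y ∈ (x :: rest0).takeWhile pred, y = "O" := by
          intro y hy
          have := List.mem_takeWhile_imp hy
          simp only [hpred, beq_iff_eq] at this
          simpa using this
        have hdroplen : ((x :: rest0).dropWhile pred).length ≤ n := by
          have hpx : pred x = true := by simp [hpred, hx]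
          have : (x :: rest0).dropWhile pred = rest0.dropWhile pred := by
            simp [hpx]
          rw [this]
          have := List.length_dropWhile_le pred rest0
          simp only [List.length_cons] at hlen
          omega
        conv_rhs => rw [← hsplit]
        rw [pvF_off_run _ _ _ hallO]
        rw [ih _ hdroplen]
        simp only [if_false, Bool.false_eq_true]
      -- work run
      · have hwork : (x != "O") = true := by simp [hx]
        simp only [hwork]
        set pred : String → Bool := fun y => (y != "O") == true with hpred
        have hsplit : (x :: rest0).takeWhile pred ++ (x :: rest0).dropWhile pred = x :: rest0 :=
          List.takeWhile_append_dropWhile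
        have hallW : ∀ y ∈ (x :: rest0).takeWhile pred, y ≠ "O" := by
          intro y hy
          have := List.mem_takeWhile_imp hy
          simp only [hpred, beq_iff_eq] at this
          simpa using this
        have hdroplen : ((x :: rest0).dropWhile pred).length ≤ n := by
          have hpx : pred x = true := by simp [hpred, hx]
          have : (x :: rest0).dropWhile pred = rest0.dropWhile pred := by
            simp [hpx]
          rw [this]
          have := List.length_dropWhile_le pred rest0
          simp only [List.length_cons] at hlen
          omega
        have hdrophead : (x :: rest0).dropWhile pred = [] ∨
            ∃ t, (x :: rest0).dropWhile pred = "O" :: t := by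
          cases hd : (x :: rest0).dropWhile pred with
          | nil => exact Or.inl rfl
          | cons y t =>
            refine Or.inr ⟨t, ?_⟩
            have hy : pred y = false := by
              have := List.head?_dropWhile_not pred (x :: rest0)
              rw [hd] at this; simpa using this
            have : y = "O" := by
              simp only [hpred] at hy
              simpa using hy
            rw [this]
        conv_rhs => rw [← hsplit]
        rw [pvF_work_run _ _ _ 0 hallW]
        rw [pvF_reset _ _ _ hdrophead]
        rw [ih _ hdroplen]
        simp only [if_true, zero_add]

-- ===== VERDICT (by name: the statement is the Claim_ definition above) =====
theorem analyze_pattern_consecutive_positions_spec : Claim_equal_analyze_pattern_consecutive_positions := by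
  intro pattern _
  unfold Spec_analyze_pattern_consecutive_positions
  unfold analyze_pattern_consecutive_positions analyze_pattern_consecutive_positions_alt
  rw [pvA_fold pattern 0 PySem.Dict.empty 0 (by simp [PySem.Dict.keys_empty])]
  rw [pvRunGo_eq_pvF pattern.length pattern (le_refl _) 0]
  rfl
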